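-- pv_equiv track=rewrite | github.com/hanepo/ai_violence_detection | utils/inference.py | _resolve_aggressive_index
-- ===== SOURCE A (Python) =====
-- def _resolve_aggressive_index(labels: list[str]) -> int | None:
--     if not labels:
--         return None
--
--     for i, label in enumerate(labels):
--         norm = label.lower().replace("-", "_").replace(" ", "_")
--         if norm == "aggressive":
--             return i
--
--     for i, label in enumerate(labels):
--         norm = label.lower().replace("-", "_").replace(" ", "_")
--         if "aggress" in norm or "fight" in norm or "viol" in norm:
--             return i
--
--     return None
-- ===== SOURCE B (Python) =====
-- def _resolve_aggressive_index(labels: list[str]) -> int | None: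
--     fuzzy = None
--     for i, label in enumerate(labels):
--         norm = label.lower().replace("-", "_").replace(" ", "_")
--         if norm == "aggressive":
--             return i
--         if fuzzy is None and ("aggress" in norm or "fight" in norm or "viol" in norm):
--             fuzzy = i
--     return fuzzy
-- ===== Notes on version B (the rewrite author's own statement) =====
-- stated objective: simpler
-- what changed: Merges A's two enumerate passes (and the empty-list guard) into one pass that returns an exact match immediately and remembers only the first fuzzy-match index, returned after the loop.
import Mathlib
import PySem

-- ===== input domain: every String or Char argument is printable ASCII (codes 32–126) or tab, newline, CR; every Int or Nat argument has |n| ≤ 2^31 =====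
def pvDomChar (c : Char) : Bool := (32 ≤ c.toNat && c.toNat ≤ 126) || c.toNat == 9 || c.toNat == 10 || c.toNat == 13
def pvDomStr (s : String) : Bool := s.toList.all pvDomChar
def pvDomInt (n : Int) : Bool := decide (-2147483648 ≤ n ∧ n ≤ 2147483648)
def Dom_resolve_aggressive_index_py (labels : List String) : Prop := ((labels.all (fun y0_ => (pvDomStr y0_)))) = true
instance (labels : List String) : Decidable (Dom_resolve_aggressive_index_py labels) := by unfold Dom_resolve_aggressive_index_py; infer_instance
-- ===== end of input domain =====

-- B merges A's two enumerate passes into one pass that returns an exact match at once and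
-- remembers only the first fuzzy index (simpler, same O(n) cost).


-- ===== PORT A =====
-- norm = label.lower().replace("-", "_").replace(" ", "_")
def pvNormA (label : String) : String :=
  PySem.Str.replace (PySem.Str.replace (PySem.Str.lower label) "-" "_") " " "_"

-- first loop: exact match "aggressive"
def pvLoop1 : List (Int × String) → Option Int
  | [] => none
  | (i, label) :: rest =>
    let norm := pvNormA label
    if norm == "aggressive" then some i else pvLoop1 rest

-- second loop: fuzzy substring match
def pvLoop2 : List (Int × String) → Option Int
  | [] => none
  | (i, label) :: rest =>
    let norm := pvNormA label
    if PySem.Str.isIn "aggress" norm || PySem.Str.isIn "fight" norm || PySem.Str.isIn "viol" norm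
    then some i else pvLoop2 rest

def resolve_aggressive_index_py (labels : List String) : Option Int :=
  if labels.isEmpty then none
  else
    match pvLoop1 (PySem.List.enumerate labels) with
    | some i => some i
    | none => pvLoop2 (PySem.List.enumerate labels)

-- ===== PORT B =====
def pvNormB (label : String) : String :=
  PySem.Str.replace (PySem.Str.replace (PySem.Str.lower label) "-" "_") " " "_"

-- one pass: return exact match at once, remember the first fuzzy index
def pvScan (i : Int) (fuzzy : Option Int) : List String → Option Int
  | [] => fuzzy
  | label :: rest =>
    let norm := pvNormB label
    if norm == "aggressive" then some i
    else
      let fuzzy' :=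
        if fuzzy.isNone &&
           (PySem.Str.isIn "aggress" norm || PySem.Str.isIn "fight" norm || PySem.Str.isIn "viol" norm)
        then some i else fuzzy
      pvScan (i + 1) fuzzy' rest

def resolve_aggressive_index_py_alt (labels : List String) : Option Int :=
  pvScan 0 none labels

-- ===== PRECONDITION & SPEC =====
def Spec_resolve_aggressive_index_py (labels : List String) (out : Option Int) : Prop := out = resolve_aggressive_index_py_alt labels
instance (labels : List String) (out : Option Int) : Decidable (Spec_resolve_aggressive_index_py labels out) := by unfold Spec_resolve_aggressive_index_py; infer_instance

-- ===== CLAIM (what is proved, stated in full; the proofs are below) =====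
def Claim_equal_resolve_aggressive_index_py : Prop := ∀ (labels : List String), Dom_resolve_aggressive_index_py labels → Spec_resolve_aggressive_index_py labels (resolve_aggressive_index_py labels)

-- ===== LEMMAS AND PROOFS =====

-- One scan equals: first-loop result, else the stored fuzzy, else the second-loop result.
theorem pvScan_eq (xs : List String) : ∀ (i : Int) (f : Option Int),
    pvScan i f xs =
      match pvLoop1 (PySem.List.enumerate xs i) with
      | some k => some k
      | none =>
        match f with
        | some j => some j
        | none => pvLoop2 (PySem.List.enumerate xs i) := by
  induction xs with
  | nil => intro i f; cases f <;> simp [pvScan, PySem.List.enumerate_nil, pvLoop1, pvLoop2]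
  | cons x xs ih =>
    intro i f
    rw [PySem.List.enumerate_cons]
    show pvScan i f (x :: xs) = _
    by_cases hx : (pvNormA x == "aggressive") = true
    · simp [pvScan, pvLoop1, pvNormA, pvNormB] at hx ⊢
      simp [hx]
    · simp only [Bool.not_eq_true] at hx
      have hx' : (pvNormB x == "aggressive") = false := hx
      cases f with
      | some j =>
        -- an already-stored fuzzy index is never overwritten
        simp only [pvScan, pvLoop1, pvNormA, pvNormB] at hx' ⊢
        simp [hx', ih]
      | none =>
        by_cases hf : (PySem.Str.isIn "aggress" (pvNormA x) || PySem.Str.isIn "fight" (pvNormA x)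
            || PySem.Str.isIn "viol" (pvNormA x)) = true
        · simp only [pvScan, pvLoop1, pvLoop2, pvNormA, pvNormB] at hx' hf ⊢
          simp at hf
          simp [hx', hf, ih]
        · simp only [Bool.not_eq_true] at hf
          simp only [pvScan, pvLoop1, pvLoop2, pvNormA, pvNormB] at hx' hf ⊢
          simp at hf
          simp [hx', hf, ih]

-- ===== VERDICT (by name: the statement is the Claim_ definition above) =====
theorem resolve_aggressive_index_py_spec : Claim_equal_resolve_aggressive_index_py := by
  intro labels _
  unfold Spec_resolve_aggressive_index_py resolve_aggressive_index_py resolve_aggressive_index_py_alt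
  rw [pvScan_eq]
  cases labels with
  | nil => simp [PySem.List.enumerate_nil, pvLoop1, pvLoop2]
  | cons x xs => simp
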